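-- pv_equiv track=rewrite | github.com/team4099/log_analysis | plot_match_energy_charts.py | component_order
-- ===== SOURCE A (Python) =====
-- from typing import Any
--
-- def component_order(config: dict[str, Any], metrics: list[dict[str, Any]]) -> list[str]:
--     ordered = [
--         entry["label"]
--         for entry in config.get("current_model", {}).get("subsystem_breakdown_currents", [])
--         if isinstance(entry, dict) and isinstance(entry.get("label"), str)
--     ]
--     seen = set(ordered)
--     for metric in metrics:
--         for component_name in metric["energy_wh"]:
--             if component_name not in seen:
--                 ordered.append(component_name)
--                 seen.add(component_name)
--         for component_name in metric["mean_supply_current_a"]: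
--             if component_name not in seen:
--                 ordered.append(component_name)
--                 seen.add(component_name)
--     return ordered
-- ===== SOURCE B (Python) =====
-- def component_order(config, metrics):
--     labels = [
--         entry["label"]
--         for entry in config.get("current_model", {}).get("subsystem_breakdown_currents", [])
--         if isinstance(entry, dict) and isinstance(entry.get("label"), str)
--     ]
--     candidates = []
--     for metric in metrics:
--         candidates.extend(metric["energy_wh"])
--         candidates.extend(metric["mean_supply_current_a"])
--     # map each candidate name to its FIRST occurrence index: iterate backwards, later
--     # (= smaller-index) writes overwrite earlier ones
--     first = {}
--     for i, name in reversed(list(enumerate(candidates))):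
--         first[name] = i
--     known = set(labels)
--     extras = sorted((n for n in first if n not in known), key=first.__getitem__)
--     return labels + extras
-- ===== Notes on version B (the rewrite author's own statement) =====
-- stated objective: alternative
-- what changed: Replaces A's streaming dedup (append + seen-set inside the metric loop) by an index-and-sort algorithm: collect all metric component names, build a first-occurrence-index map by overwriting in a single backward pass, then sort the unknown names by that index and append them to the config labels.
import Mathlib
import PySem

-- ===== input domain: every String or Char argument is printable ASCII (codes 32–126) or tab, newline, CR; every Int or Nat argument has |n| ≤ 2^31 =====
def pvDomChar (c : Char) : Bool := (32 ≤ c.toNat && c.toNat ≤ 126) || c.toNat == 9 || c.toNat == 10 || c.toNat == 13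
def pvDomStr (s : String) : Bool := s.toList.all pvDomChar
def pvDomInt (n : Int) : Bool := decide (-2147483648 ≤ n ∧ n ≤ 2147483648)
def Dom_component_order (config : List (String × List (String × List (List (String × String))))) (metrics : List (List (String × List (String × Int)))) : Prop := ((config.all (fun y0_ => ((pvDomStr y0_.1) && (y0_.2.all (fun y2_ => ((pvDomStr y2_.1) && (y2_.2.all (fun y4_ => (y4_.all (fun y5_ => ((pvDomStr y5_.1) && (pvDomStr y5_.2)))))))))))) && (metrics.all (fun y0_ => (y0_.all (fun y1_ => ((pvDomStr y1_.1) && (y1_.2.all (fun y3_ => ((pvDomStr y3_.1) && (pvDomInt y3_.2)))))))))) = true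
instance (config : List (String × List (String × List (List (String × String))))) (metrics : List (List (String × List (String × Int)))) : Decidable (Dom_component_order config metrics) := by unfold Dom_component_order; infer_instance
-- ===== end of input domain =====

-- B replaces A's streaming dedup (append + seen-set inside the metric loop) by an index-and-sort
-- algorithm: collect all metric names, map each to its first-occurrence index in one backward
-- overwrite pass, and sort the unknown names by that index; same result, different strategy.

-- ===== PORT A =====
-- shared front-end of both Pythons: the config-label comprehension
-- (entry["label"] for dict entries whose .get("label") is a string; values are strings by type)
def coLabels (config : List (String × List (String × List (List (String × String))))) : List String :=
  (PySem.Dict.getD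
      (PySem.Dict.ofList
        (PySem.Dict.getD (PySem.Dict.ofList config) "current_model" []))
      "subsystem_breakdown_currents" []).filterMap
    (fun entry => (PySem.Dict.ofList entry).get? "label")

-- iterating metric[key] (a Python dict) yields its keys in insertion order
def coKeys (metric : List (String × List (String × Int))) (key : String) : List String :=
  (PySem.Dict.ofList (PySem.Dict.getD (PySem.Dict.ofList metric) key [])).keys

-- body of A's inner 'if component_name not in seen: ordered.append(…); seen.add(…)'
def coStep (st : List String × PySem.Set String) (name : String) : List String × PySem.Set String :=
  if st.2.contains name then st else (st.1 ++ [name], st.2.add name)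

def component_order (config : List (String × List (String × List (List (String × String))))) (metrics : List (List (String × List (String × Int)))) : List String :=
  let ordered := coLabels config
  let seen := PySem.Set.ofList ordered
  (metrics.foldl
    (fun st metric =>
      (coKeys metric "mean_supply_current_a").foldl coStep
        ((coKeys metric "energy_wh").foldl coStep st))
    (ordered, seen)).1

-- ===== PORT B =====
-- 'for i, name in reversed(list(enumerate(candidates))): first[name] = i'
def coFirst (xs : List String) : PySem.Dict String Int :=
  ((PySem.List.enumerate xs 0).reverse).foldl (fun d p => d.insert p.2 p.1) PySem.Dict.empty

def component_order_alt (config : List (String × List (String × List (List (String × String))))) (metrics : List (List (String × List (String × Int)))) : List String :=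
  let labels := coLabels config
  let candidates := metrics.foldl
    (fun acc metric => (acc ++ coKeys metric "energy_wh") ++ coKeys metric "mean_supply_current_a") []
  let first := coFirst candidates
  let known := PySem.Set.ofList labels
  let extras := PySem.List.sorted (first.keys.filter (fun n => !known.contains n))
    (fun n => first.getD n 0) false
  labels ++ extras

-- ===== PRECONDITION & SPEC =====
-- Pre_ excludes exactly the inputs where A raises KeyError: a metric dict missing
-- the key "energy_wh" or "mean_supply_current_a" (B raises there too).
def Pre_component_order (config : List (String × List (String × List (List (String × String))))) (metrics : List (List (String × List (String × Int)))) : Prop :=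
  ∀ m ∈ metrics, "energy_wh" ∈ m.map Prod.fst ∧ "mean_supply_current_a" ∈ m.map Prod.fst
instance (config : List (String × List (String × List (List (String × String))))) (metrics : List (List (String × List (String × Int)))) : Decidable (Pre_component_order config metrics) := by unfold Pre_component_order; infer_instance

def pvWitness_component_order : (List (String × List (String × List (List (String × String))))) × (List (List (String × List (String × Int)))) :=
  ([("current_model", [("subsystem_breakdown_currents", [[("label", "drive")]])])],
   [[("energy_wh", [("drive", 3), ("arm", 1)]), ("mean_supply_current_a", [("intake", 2)])]])

def Spec_component_order (config : List (String × List (String × List (List (String × String))))) (metrics : List (List (String × List (String × Int)))) (out : List String) : Prop := out = component_order_alt config metrics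
instance (config : List (String × List (String × List (List (String × String))))) (metrics : List (List (String × List (String × Int)))) (out : List String) : Decidable (Spec_component_order config metrics out) := by unfold Spec_component_order; infer_instance

-- ===== CLAIM (what is proved, stated in full; the proofs are below) =====
def Claim_equal_component_order : Prop := ∀ (config : List (String × List (String × List (List (String × String))))) (metrics : List (List (String × List (String × Int)))), Dom_component_order config metrics → Pre_component_order config metrics → Spec_component_order config metrics (component_order config metrics)

-- ===== LEMMAS AND PROOFS =====

-- the chained candidate sequence both programs range over
def coCands (metrics : List (List (String × List (String × Int)))) : List String :=
  metrics.flatMap (fun metric => coKeys metric "energy_wh" ++ coKeys metric "mean_supply_current_a")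

-- A's nested per-metric loops are one fold of coStep over the chained candidate list
theorem foldl_metrics_eq_flatMap (metrics : List (List (String × List (String × Int))))
    (st : List String × PySem.Set String) :
    metrics.foldl
      (fun st metric =>
        (coKeys metric "mean_supply_current_a").foldl coStep
          ((coKeys metric "energy_wh").foldl coStep st))
      st
    = (coCands metrics).foldl coStep st := by
  induction metrics generalizing st with
  | nil => rfl
  | cons m ms ih => simp [coCands, List.flatMap_cons, List.foldl_append, ih]

-- the seen-set grows exactly as Set.add, so the loop state stays a prefix
theorem prefix_foldl_add (ks : List String) (s : PySem.Set String) :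
    s <+: ks.foldl PySem.Set.add s := by
  induction ks generalizing s with
  | nil => exact List.prefix_refl s
  | cons k ks ih =>
    refine List.IsPrefix.trans ?_ (ih (PySem.Set.add s k))
    by_cases h : k ∈ s
    · rw [PySem.Set.add_of_mem h]
    · rw [PySem.Set.add_of_not_mem h]; exact List.prefix_append s [k]

-- characterisation of A's loop: result list = acc ++ the names the set-fold appends
theorem foldl_coStep_char (ks : List String) (acc : List String) (s : PySem.Set String) :
    ks.foldl coStep (acc, s)
    = (acc ++ (ks.foldl PySem.Set.add s).drop s.length, ks.foldl PySem.Set.add s) := by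
  induction ks generalizing acc s with
  | nil => simp
  | cons k ks ih =>
    by_cases h : k ∈ s
    · have hstep : coStep (acc, s) k = (acc, s) := by simp [coStep, h]
      have hadd : PySem.Set.add s k = s := PySem.Set.add_of_mem h
      simp only [List.foldl_cons, hstep, hadd, ih]
    · have hstep : coStep (acc, s) k = (acc ++ [k], PySem.Set.add s k) := by simp [coStep, h]
      have hadd : PySem.Set.add s k = s ++ [k] := PySem.Set.add_of_not_mem h
      simp only [List.foldl_cons]
      rw [hstep, hadd, ih]
      obtain ⟨r, hr⟩ := prefix_foldl_add ks (s ++ [k])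
      simp only [Prod.mk.injEq]
      refine ⟨?_, trivial⟩
      rw [← hr]
      have h1 : ((s ++ [k]) ++ r).drop (s ++ [k]).length = r := List.drop_left
      have h2 : ((s ++ [k]) ++ r).drop s.length = [k] ++ r := by
        rw [List.append_assoc]; exact List.drop_left
      rw [h1, h2, List.append_assoc]

-- A in closed form: labels, then the fresh names of the candidate sequence in first-occurrence order
theorem component_order_char (config : List (String × List (String × List (List (String × String))))) (metrics : List (List (String × List (String × Int)))) :
    component_order config metrics
    = coLabels config
      ++ (PySem.List.dedup (coCands metrics)).filter
          (fun n => !(PySem.Set.ofList (coLabels config)).contains n) := by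
  unfold component_order
  simp only [foldl_metrics_eq_flatMap, foldl_coStep_char]
  have hupd : (coCands metrics).foldl PySem.Set.add (PySem.Set.ofList (coLabels config))
      = PySem.Set.update (PySem.Set.ofList (coLabels config)) (coCands metrics) := rfl
  rw [hupd, PySem.Set.update_eq_append_filter, List.drop_left]
  simp

-- the backward overwrite pass stores each name's FIRST index in the enumerated list
theorem getD_revEnumFold (xs : List String) (s : Int) (d : PySem.Dict String Int) (n : String) :
    (((PySem.List.enumerate xs s).reverse).foldl (fun d p => d.insert p.2 p.1) d).getD n 0
    = if n ∈ xs then s + (xs.idxOf n : Int) else d.getD n 0 := by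
  induction xs generalizing s d with
  | nil => simp [PySem.List.enumerate_nil]
  | cons x xs ih =>
    rw [PySem.List.enumerate_cons]
    simp only [List.reverse_cons, List.foldl_append, List.foldl_cons, List.foldl_nil]
    rw [PySem.Dict.getD_insert]
    by_cases hx : n = x
    · subst hx; simp [List.idxOf_cons_self]
    · rw [if_neg hx, ih]
      by_cases hmem : n ∈ xs
      · rw [if_pos hmem, if_pos (by simp [hmem]), List.idxOf_cons_ne _ (Ne.symm hx)]
        push_cast; ring
      · rw [if_neg hmem, if_neg (by simp [hx, hmem])]

theorem getD_coFirst (xs : List String) (n : String) (h : n ∈ xs) :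
    (coFirst xs).getD n 0 = (xs.idxOf n : Int) := by
  unfold coFirst; rw [getD_revEnumFold, if_pos h]; ring

-- the keys of coFirst are the distinct names (in last-occurrence order)
theorem keys_coFirst (xs : List String) :
    (coFirst xs).keys = PySem.Set.ofList xs.reverse := by
  unfold coFirst
  rw [PySem.Dict.keys_foldl_insert_key ((PySem.List.enumerate xs 0).reverse)
      (fun p => p.2) (fun _ p => p.1) PySem.Dict.empty]
  have hm : ((PySem.List.enumerate xs (0 : Int)).reverse.map (fun p => p.2)) = xs.reverse := by
    rw [List.map_reverse, PySem.List.map_snd_enumerate]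
  rw [hm]
  simp [PySem.Set.update_nil_left]

theorem ofList_reverse_perm (xs : List String) :
    (PySem.Set.ofList xs.reverse).Perm (PySem.Set.ofList xs) := by
  rw [List.perm_ext_iff_of_nodup (PySem.Set.nodup_ofList _) (PySem.Set.nodup_ofList _)]
  intro a; simp [PySem.Set.mem_ofList]

-- idxOf of a fresh element appended at the back
theorem idxOf_append_singleton_self (l : List String) (v : String) (h : v ∉ l) :
    (l ++ [v]).idxOf v = l.length := by
  induction l with
  | nil => simp
  | cons a t ih =>
    simp only [List.mem_cons, not_or] at h
    rw [List.cons_append, List.idxOf_cons_ne _ (Ne.symm h.1), ih h.2]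
    simp

-- a first-occurrence dedup list is strictly increasing under idxOf
theorem pairwise_idxOf_ofList (xs : List String) :
    (PySem.Set.ofList xs).Pairwise (fun a b => xs.idxOf a < xs.idxOf b) := by
  induction xs using List.reverseRecOn with
  | nil => simp [PySem.Set.ofList_nil]
  | append_singleton xs x ih =>
    rw [PySem.Set.ofList_append_singleton]
    have hlift : (PySem.Set.ofList xs).Pairwise
        (fun a b => (xs ++ [x]).idxOf a < (xs ++ [x]).idxOf b) := by
      refine ih.imp_of_mem ?_
      intro a b ha hb hab
      have ha' := (PySem.Set.mem_ofList _ _).1 ha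
      have hb' := (PySem.Set.mem_ofList _ _).1 hb
      rwa [List.idxOf_append_of_mem ha', List.idxOf_append_of_mem hb']
    by_cases hx : x ∈ PySem.Set.ofList xs
    · rwa [PySem.Set.add_of_mem hx]
    · rw [PySem.Set.add_of_not_mem hx]
      have hxs : x ∉ xs := fun h => hx ((PySem.Set.mem_ofList _ _).2 h)
      rw [List.pairwise_append]
      refine ⟨hlift, by simp, ?_⟩
      intro a ha b hb
      have ha' := (PySem.Set.mem_ofList _ _).1 ha
      rw [List.mem_singleton] at hb; subst hb
      rw [List.idxOf_append_of_mem ha', idxOf_append_singleton_self xs b hxs]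
      exact List.idxOf_lt_length_of_mem ha'

-- B's sort reproduces the first-occurrence order exactly
theorem extras_eq (labels cands : List String) :
    PySem.List.sorted ((coFirst cands).keys.filter (fun n => !(PySem.Set.ofList labels).contains n))
      (fun n => (coFirst cands).getD n 0) false
    = (PySem.List.dedup cands).filter (fun n => !(PySem.Set.ofList labels).contains n) := by
  apply PySem.List.sorted_eq_of_perm_of_pairwise_lt
  · rw [keys_coFirst, PySem.List.dedup_eq_ofList]
    exact ((ofList_reverse_perm cands).filter _).symm
  · rw [PySem.List.dedup_eq_ofList]
    refine ((pairwise_idxOf_ofList cands).sublist List.filter_sublist).imp_of_mem ?_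
    intro a b ha hb hab
    have ha' := (PySem.Set.mem_ofList _ _).1 (List.mem_of_mem_filter ha)
    have hb' := (PySem.Set.mem_ofList _ _).1 (List.mem_of_mem_filter hb)
    rw [getD_coFirst _ _ ha', getD_coFirst _ _ hb']
    exact_mod_cast hab

-- ===== VERDICT (by name: the statement is the Claim_ definition above) =====
theorem component_order_spec : Claim_equal_component_order := by
  intro config metrics _ _
  unfold Spec_component_order component_order_alt
  rw [component_order_char]
  have hc : metrics.foldl
      (fun acc metric => (acc ++ coKeys metric "energy_wh") ++ coKeys metric "mean_supply_current_a") []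
      = coCands metrics := by
    simp only [List.append_assoc]
    rw [PySem.List.foldl_append_eq_flatMap]
    simp [coCands]
  rw [hc]
  exact congrArg (coLabels config ++ ·) (extras_eq (coLabels config) (coCands metrics)).symm
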